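-- pv_equiv track=rewrite | github.com/HARP-research-Inc/WordNetExplorer | tests/test_arrow_consistency.py | _analyze_color_family_consistency
-- ===== SOURCE A (Python) =====
-- def _analyze_color_family_consistency(family, colors):
--     """Analyze if colors in a family are visually consistent."""
--     if len(colors) <= 1:
--         return "Single color - consistent"
--
--     # Convert hex colors to RGB for analysis
--     rgb_colors = []
--     for color in colors:
--         if color.startswith('#') and len(color) == 7:
--             try:
--                 r = int(color[1:3], 16)
--                 g = int(color[3:5], 16)
--                 b = int(color[5:7], 16)
--                 rgb_colors.append((r, g, b))
--             except ValueError: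
--                 continue
--
--     if len(rgb_colors) <= 1:
--         return "Unable to analyze"
--
--     # For family consistency, check if colors share similar dominant channels
--     family_expectations = {
--         'taxonomic': 'red_dominant',     # Red family
--         'part_whole': 'green_dominant',  # Green family
--         'opposition': 'purple_mixed',    # Purple family (high red+blue)
--         'causation': 'orange_mixed',     # Orange family (high red+green)
--         'cross_reference': 'blue_dominant',  # Blue family
--         'morphological': 'pink_mixed',   # Pink family (high red)
--         'domain': 'grey_balanced'        # Grey family (balanced RGB)
--     }
--
--     expected = family_expectations.get(family, 'unknown')
--
--     if expected == 'red_dominant':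
--         # Check if red is dominant in most colors
--         red_dominant = sum(1 for r, g, b in rgb_colors if r > g and r > b)
--         return f"Red dominant in {red_dominant}/{len(rgb_colors)} colors"
--     elif expected == 'green_dominant':
--         green_dominant = sum(1 for r, g, b in rgb_colors if g > r and g > b)
--         return f"Green dominant in {green_dominant}/{len(rgb_colors)} colors"
--     elif expected == 'blue_dominant':
--         blue_dominant = sum(1 for r, g, b in rgb_colors if b > r and b > g)
--         return f"Blue dominant in {blue_dominant}/{len(rgb_colors)} colors"
--     elif expected == 'purple_mixed':
--         purple_like = sum(1 for r, g, b in rgb_colors if r > 100 and b > 100 and g < max(r, b))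
--         return f"Purple-like in {purple_like}/{len(rgb_colors)} colors"
--     elif expected == 'orange_mixed':
--         orange_like = sum(1 for r, g, b in rgb_colors if r > 150 and g > 50 and b < 100)
--         return f"Orange-like in {orange_like}/{len(rgb_colors)} colors"
--     else:
--         return f"Family analysis for {expected}"
-- ===== SOURCE B (Python) =====
-- _EXPECTED = {
--     'taxonomic': 'red_dominant',
--     'part_whole': 'green_dominant',
--     'opposition': 'purple_mixed',
--     'causation': 'orange_mixed',
--     'cross_reference': 'blue_dominant',
--     'morphological': 'pink_mixed',
--     'domain': 'grey_balanced',
-- }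
--
--
-- def _analyze_color_family_consistency(family, colors):
--     if len(colors) <= 1:
--         return "Single color - consistent"
--     # Single pass: parse and tally all five channel tests at once, keeping only
--     # six counters instead of materialising the RGB list.
--     total = red = green = blue = purple = orange = 0
--     for color in colors:
--         if not (color.startswith('#') and len(color) == 7):
--             continue
--         try:
--             r = int(color[1:3], 16)
--             g = int(color[3:5], 16)
--             b = int(color[5:7], 16)
--         except ValueError:
--             continue
--         total += 1
--         red += r > g and r > b
--         green += g > r and g > b
--         blue += b > r and b > g
--         purple += r > 100 and b > 100 and g < max(r, b)
--         orange += r > 150 and g > 50 and b < 100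
--     if total <= 1:
--         return "Unable to analyze"
--     expected = _EXPECTED.get(family, 'unknown')
--     table = {
--         'red_dominant': ('Red dominant', red),
--         'green_dominant': ('Green dominant', green),
--         'blue_dominant': ('Blue dominant', blue),
--         'purple_mixed': ('Purple-like', purple),
--         'orange_mixed': ('Orange-like', orange),
--     }
--     if expected in table:
--         phrase, count = table[expected]
--         return f"{phrase} in {count}/{total} colors"
--     return f"Family analysis for {expected}"
-- ===== Notes on version B (the rewrite author's own statement) =====
-- stated objective: alternative
-- what changed: Instead of materialising the parsed RGB list and then running one family-specific counting pass chosen by an if/elif cascade, B makes a single fused pass over the colors maintaining six integer counters (total plus all five channel tests), and at the end selects the phrase/counter pair for the family's expected tag from a small table.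
import Mathlib
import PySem

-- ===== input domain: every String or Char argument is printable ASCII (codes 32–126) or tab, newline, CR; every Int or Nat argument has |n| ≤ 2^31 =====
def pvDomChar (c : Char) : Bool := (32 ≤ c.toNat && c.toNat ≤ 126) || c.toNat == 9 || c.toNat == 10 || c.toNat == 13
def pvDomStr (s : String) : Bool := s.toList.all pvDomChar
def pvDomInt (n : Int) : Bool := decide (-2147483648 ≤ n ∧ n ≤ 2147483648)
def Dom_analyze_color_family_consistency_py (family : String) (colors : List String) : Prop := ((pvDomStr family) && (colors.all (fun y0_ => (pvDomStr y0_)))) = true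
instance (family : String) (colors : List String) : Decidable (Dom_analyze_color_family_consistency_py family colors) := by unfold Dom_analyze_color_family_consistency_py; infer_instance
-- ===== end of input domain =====

-- B replaces A's build-the-RGB-list-then-count-by-cascade shape by a single fused pass
-- keeping six integer counters (total + all five channel tests) and a final table lookup
-- of the phrase/counter pair (objective: alternative decomposition, same cost).

-- ===== PORT A =====
-- int(s, 16) is PySem.Int.ofCharsBase? (exact); the try/except ValueError is the Option
-- match (skip the color on none).
def analyze_color_family_consistency_py (family : String) (colors : List String) : String :=
  if colors.length ≤ 1 then "Single color - consistent"
  else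
    let rgb_colors := colors.foldl (fun acc color =>
      let cs := color.toList
      if PySem.Chars.startswith cs ['#'] && cs.length == 7 then
        match PySem.Int.ofCharsBase? (PySem.List.slice cs (some 1) (some 3)) 16,
              PySem.Int.ofCharsBase? (PySem.List.slice cs (some 3) (some 5)) 16,
              PySem.Int.ofCharsBase? (PySem.List.slice cs (some 5) (some 7)) 16 with
        | some r, some g, some b => acc ++ [(r, g, b)]
        | _, _, _ => acc
      else acc) ([] : List (Int × Int × Int))
    if rgb_colors.length ≤ 1 then "Unable to analyze"
    else
      let family_expectations : PySem.Dict String String := PySem.Dict.ofList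
        [("taxonomic", "red_dominant"), ("part_whole", "green_dominant"),
         ("opposition", "purple_mixed"), ("causation", "orange_mixed"),
         ("cross_reference", "blue_dominant"), ("morphological", "pink_mixed"),
         ("domain", "grey_balanced")]
      let expected := family_expectations.getD family "unknown"
      if expected == "red_dominant" then
        let red_dominant := rgb_colors.foldl
          (fun a t => if t.1 > t.2.1 && t.1 > t.2.2 then a + 1 else a) (0 : Int)
        "Red dominant in " ++ PySem.Int.toStr red_dominant ++ "/" ++
          PySem.Int.toStr (rgb_colors.length : Int) ++ " colors"
      else if expected == "green_dominant" then
        let green_dominant := rgb_colors.foldl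
          (fun a t => if t.2.1 > t.1 && t.2.1 > t.2.2 then a + 1 else a) (0 : Int)
        "Green dominant in " ++ PySem.Int.toStr green_dominant ++ "/" ++
          PySem.Int.toStr (rgb_colors.length : Int) ++ " colors"
      else if expected == "blue_dominant" then
        let blue_dominant := rgb_colors.foldl
          (fun a t => if t.2.2 > t.1 && t.2.2 > t.2.1 then a + 1 else a) (0 : Int)
        "Blue dominant in " ++ PySem.Int.toStr blue_dominant ++ "/" ++
          PySem.Int.toStr (rgb_colors.length : Int) ++ " colors"
      else if expected == "purple_mixed" then
        let purple_like := rgb_colors.foldl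
          (fun a t => if t.1 > 100 && t.2.2 > 100 && t.2.1 < max t.1 t.2.2 then a + 1 else a) (0 : Int)
        "Purple-like in " ++ PySem.Int.toStr purple_like ++ "/" ++
          PySem.Int.toStr (rgb_colors.length : Int) ++ " colors"
      else if expected == "orange_mixed" then
        let orange_like := rgb_colors.foldl
          (fun a t => if t.1 > 150 && t.2.1 > 50 && t.2.2 < 100 then a + 1 else a) (0 : Int)
        "Orange-like in " ++ PySem.Int.toStr orange_like ++ "/" ++
          PySem.Int.toStr (rgb_colors.length : Int) ++ " colors"
      else
        "Family analysis for " ++ expected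

-- ===== PORT B =====
def pvExpected : PySem.Dict String String := PySem.Dict.ofList
  [("taxonomic", "red_dominant"), ("part_whole", "green_dominant"),
   ("opposition", "purple_mixed"), ("causation", "orange_mixed"),
   ("cross_reference", "blue_dominant"), ("morphological", "pink_mixed"),
   ("domain", "grey_balanced")]

-- state = (total, red, green, blue, purple, orange)
def analyze_color_family_consistency_py_alt (family : String) (colors : List String) : String :=
  if colors.length ≤ 1 then "Single color - consistent"
  else
    let st := colors.foldl (fun st color =>
      let cs := color.toList
      if !(PySem.Chars.startswith cs ['#'] && cs.length == 7) then st
      else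
        match PySem.Int.ofCharsBase? (PySem.List.slice cs (some 1) (some 3)) 16 with
        | none => st
        | some r =>
          match PySem.Int.ofCharsBase? (PySem.List.slice cs (some 3) (some 5)) 16 with
          | none => st
          | some g =>
            match PySem.Int.ofCharsBase? (PySem.List.slice cs (some 5) (some 7)) 16 with
            | none => st
            | some b =>
            (st.1 + 1,
             st.2.1 + (if r > g && r > b then (1 : Int) else 0),
             st.2.2.1 + (if g > r && g > b then (1 : Int) else 0),
             st.2.2.2.1 + (if b > r && b > g then (1 : Int) else 0),
             st.2.2.2.2.1 + (if r > 100 && b > 100 && g < max r b then (1 : Int) else 0),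
             st.2.2.2.2.2 + (if r > 150 && g > 50 && b < 100 then (1 : Int) else 0)))
      ((0, 0, 0, 0, 0, 0) : Int × Int × Int × Int × Int × Int)
    if st.1 ≤ 1 then "Unable to analyze"
    else
      let expected := pvExpected.getD family "unknown"
      let table : PySem.Dict String (String × Int) := PySem.Dict.ofList
        [("red_dominant", ("Red dominant", st.2.1)),
         ("green_dominant", ("Green dominant", st.2.2.1)),
         ("blue_dominant", ("Blue dominant", st.2.2.2.1)),
         ("purple_mixed", ("Purple-like", st.2.2.2.2.1)),
         ("orange_mixed", ("Orange-like", st.2.2.2.2.2))]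
      match table.get? expected with
      | some (phrase, count) =>
          phrase ++ " in " ++ PySem.Int.toStr count ++ "/" ++
            PySem.Int.toStr st.1 ++ " colors"
      | none => "Family analysis for " ++ expected

-- ===== PRECONDITION & SPEC =====
def Spec_analyze_color_family_consistency_py (family : String) (colors : List String) (out : String) : Prop := out = analyze_color_family_consistency_py_alt family colors
instance (family : String) (colors : List String) (out : String) : Decidable (Spec_analyze_color_family_consistency_py family colors out) := by unfold Spec_analyze_color_family_consistency_py; infer_instance

-- ===== CLAIM (what is proved, stated in full; the proofs are below) =====
def Claim_equal_analyze_color_family_consistency_py : Prop := ∀ (family : String) (colors : List String), Dom_analyze_color_family_consistency_py family colors → Spec_analyze_color_family_consistency_py family colors (analyze_color_family_consistency_py family colors)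

-- ===== LEMMAS AND PROOFS =====

-- proof-only helper: the triple a single color contributes (none = skipped)
def pvHexRGB? (color : String) : Option (Int × Int × Int) :=
  let cs := color.toList
  if !(PySem.Chars.startswith cs ['#'] && cs.length == 7) then none
  else
    (PySem.Int.ofCharsBase? (PySem.List.slice cs (some 1) (some 3)) 16).bind fun r =>
      (PySem.Int.ofCharsBase? (PySem.List.slice cs (some 3) (some 5)) 16).bind fun g =>
        (PySem.Int.ofCharsBase? (PySem.List.slice cs (some 5) (some 7)) 16).map fun b =>
          (r, g, b)

def pvPr (t : Int × Int × Int) : Bool := t.1 > t.2.1 && t.1 > t.2.2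
def pvPg (t : Int × Int × Int) : Bool := t.2.1 > t.1 && t.2.1 > t.2.2
def pvPb (t : Int × Int × Int) : Bool := t.2.2 > t.1 && t.2.2 > t.2.1
def pvPp (t : Int × Int × Int) : Bool := t.1 > 100 && t.2.2 > 100 && t.2.1 < max t.1 t.2.2
def pvPo (t : Int × Int × Int) : Bool := t.1 > 150 && t.2.1 > 50 && t.2.2 < 100

-- A's accumulating parse loop builds exactly the filterMap of the shared parser.
theorem pv_rgb_eq (colors : List String) (acc : List (Int × Int × Int)) :
    colors.foldl (fun acc color =>
      let cs := color.toList
      if PySem.Chars.startswith cs ['#'] && cs.length == 7 then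
        match PySem.Int.ofCharsBase? (PySem.List.slice cs (some 1) (some 3)) 16,
              PySem.Int.ofCharsBase? (PySem.List.slice cs (some 3) (some 5)) 16,
              PySem.Int.ofCharsBase? (PySem.List.slice cs (some 5) (some 7)) 16 with
        | some r, some g, some b => acc ++ [(r, g, b)]
        | _, _, _ => acc
      else acc) acc = acc ++ colors.filterMap pvHexRGB? := by
  induction colors generalizing acc with
  | nil => simp
  | cons c cs ih =>
    rw [List.foldl_cons, ih]
    have hstep : (let l := c.toList
        if PySem.Chars.startswith l ['#'] && l.length == 7 then
          match PySem.Int.ofCharsBase? (PySem.List.slice l (some 1) (some 3)) 16,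
                PySem.Int.ofCharsBase? (PySem.List.slice l (some 3) (some 5)) 16,
                PySem.Int.ofCharsBase? (PySem.List.slice l (some 5) (some 7)) 16 with
          | some r, some g, some b => acc ++ [(r, g, b)]
          | _, _, _ => acc
        else acc) = acc ++ (pvHexRGB? c).toList := by
      unfold pvHexRGB?
      cases hc : PySem.Chars.startswith c.toList ['#'] && c.toList.length == 7
      · simp only [hc]
        simp
      · simp only [hc]
        cases h1 : PySem.Int.ofCharsBase? (PySem.List.slice c.toList (some 1) (some 3)) 16 <;>
          cases h2 : PySem.Int.ofCharsBase? (PySem.List.slice c.toList (some 3) (some 5)) 16 <;>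
            cases h3 : PySem.Int.ofCharsBase? (PySem.List.slice c.toList (some 5) (some 7)) 16 <;>
              simp
    rw [hstep]
    cases h : pvHexRGB? c <;> simp [h]

-- B's fused fold computes the length and the five counts of the parsed list.
theorem pv_fold_eq (colors : List String) (st : Int × Int × Int × Int × Int × Int) :
    colors.foldl (fun st color =>
      let cs := color.toList
      if !(PySem.Chars.startswith cs ['#'] && cs.length == 7) then st
      else
        match PySem.Int.ofCharsBase? (PySem.List.slice cs (some 1) (some 3)) 16 with
        | none => st
        | some r =>
          match PySem.Int.ofCharsBase? (PySem.List.slice cs (some 3) (some 5)) 16 with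
          | none => st
          | some g =>
            match PySem.Int.ofCharsBase? (PySem.List.slice cs (some 5) (some 7)) 16 with
            | none => st
            | some b =>
            (st.1 + 1,
             st.2.1 + (if r > g && r > b then (1 : Int) else 0),
             st.2.2.1 + (if g > r && g > b then (1 : Int) else 0),
             st.2.2.2.1 + (if b > r && b > g then (1 : Int) else 0),
             st.2.2.2.2.1 + (if r > 100 && b > 100 && g < max r b then (1 : Int) else 0),
             st.2.2.2.2.2 + (if r > 150 && g > 50 && b < 100 then (1 : Int) else 0))) st =
      (st.1 + ((colors.filterMap pvHexRGB?).length : Int),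
       st.2.1 + ((colors.filterMap pvHexRGB?).countP pvPr : Int),
       st.2.2.1 + ((colors.filterMap pvHexRGB?).countP pvPg : Int),
       st.2.2.2.1 + ((colors.filterMap pvHexRGB?).countP pvPb : Int),
       st.2.2.2.2.1 + ((colors.filterMap pvHexRGB?).countP pvPp : Int),
       st.2.2.2.2.2 + ((colors.filterMap pvHexRGB?).countP pvPo : Int)) := by
  induction colors generalizing st with
  | nil => simp
  | cons c cs ih =>
    rw [List.foldl_cons, ih, List.filterMap_cons]
    unfold pvHexRGB?
    cases hc : PySem.Chars.startswith c.toList ['#'] && c.toList.length == 7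
    · simp only [hc]
      simp
    · simp only [hc]
      cases h1 : PySem.Int.ofCharsBase? (PySem.List.slice c.toList (some 1) (some 3)) 16 <;>
        cases h2 : PySem.Int.ofCharsBase? (PySem.List.slice c.toList (some 3) (some 5)) 16 <;>
          cases h3 : PySem.Int.ofCharsBase? (PySem.List.slice c.toList (some 5) (some 7)) 16
      all_goals simp [pvPr, pvPg, pvPb, pvPp, pvPo, List.countP_cons, Prod.ext_iff]
      all_goals omega

theorem analyze_eq (family : String) (colors : List String) :
    analyze_color_family_consistency_py family colors =
      analyze_color_family_consistency_py_alt family colors := by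
  unfold analyze_color_family_consistency_py analyze_color_family_consistency_py_alt
  by_cases hlen : colors.length ≤ 1
  · simp [hlen]
  · simp only [hlen, if_false]
    rw [pv_rgb_eq colors [], pv_fold_eq colors]
    simp only [List.nil_append, zero_add]
    set L := colors.filterMap pvHexRGB? with hL
    have hguard : (L.length ≤ 1) = ((L.length : Int) ≤ 1) := by
      simp only [eq_iff_iff]; exact_mod_cast Iff.rfl
    by_cases h2 : L.length ≤ 1
    · have : ((L.length : Int) ≤ 1) := by exact_mod_cast h2
      simp [h2, this]
    · have h2' : ¬ ((L.length : Int) ≤ 1) := by exact_mod_cast h2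
      simp only [h2, h2', if_false]
      rw [show (PySem.Dict.ofList
        [("taxonomic", "red_dominant"), ("part_whole", "green_dominant"),
         ("opposition", "purple_mixed"), ("causation", "orange_mixed"),
         ("cross_reference", "blue_dominant"), ("morphological", "pink_mixed"),
         ("domain", "grey_balanced")] : PySem.Dict String String) = pvExpected from rfl]
      set expected := pvExpected.getD family "unknown" with hexp
      by_cases e1 : (expected == "red_dominant") = true
      · have he : expected = "red_dominant" := by simpa using e1
        rw [he]
        simp only [PySem.List.foldl_if_add_one, zero_add]
        rfl
      by_cases e2 : (expected == "green_dominant") = true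
      · have he : expected = "green_dominant" := by simpa using e2
        rw [he]
        simp only [PySem.List.foldl_if_add_one, zero_add]
        rfl
      by_cases e3 : (expected == "blue_dominant") = true
      · have he : expected = "blue_dominant" := by simpa using e3
        rw [he]
        simp only [PySem.List.foldl_if_add_one, zero_add]
        rfl
      by_cases e4 : (expected == "purple_mixed") = true
      · have he : expected = "purple_mixed" := by simpa using e4
        rw [he]
        simp only [PySem.List.foldl_if_add_one, zero_add]
        rfl
      by_cases e5 : (expected == "orange_mixed") = true
      · have he : expected = "orange_mixed" := by simpa using e5
        rw [he]
        simp only [PySem.List.foldl_if_add_one, zero_add]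
        rfl
      have f1 : (expected == "red_dominant") = false := by simpa using e1
      have f2 : (expected == "green_dominant") = false := by simpa using e2
      have f3 : (expected == "blue_dominant") = false := by simpa using e3
      have f4 : (expected == "purple_mixed") = false := by simpa using e4
      have f5 : (expected == "orange_mixed") = false := by simpa using e5
      have hn : ∀ t : String, (expected == t) = false → (t == expected) = false := by
        intro t h
        rw [beq_eq_false_iff_ne] at h ⊢
        exact h.symm
      have n1 : ("red_dominant" == expected) = false := hn _ f1
      have n2 : ("green_dominant" == expected) = false := hn _ f2
      have n3 : ("blue_dominant" == expected) = false := hn _ f3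
      have n4 : ("purple_mixed" == expected) = false := hn _ f4
      have n5 : ("orange_mixed" == expected) = false := hn _ f5
      have hget : (PySem.Dict.ofList
          [("red_dominant", ("Red dominant", (L.countP pvPr : Int))),
           ("green_dominant", ("Green dominant", (L.countP pvPg : Int))),
           ("blue_dominant", ("Blue dominant", (L.countP pvPb : Int))),
           ("purple_mixed", ("Purple-like", (L.countP pvPp : Int))),
           ("orange_mixed", ("Orange-like", (L.countP pvPo : Int)))] : PySem.Dict String (String × Int)).get? expected = none := by
        rw [show (PySem.Dict.ofList
          [("red_dominant", ("Red dominant", (L.countP pvPr : Int))),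
           ("green_dominant", ("Green dominant", (L.countP pvPg : Int))),
           ("blue_dominant", ("Blue dominant", (L.countP pvPb : Int))),
           ("purple_mixed", ("Purple-like", (L.countP pvPp : Int))),
           ("orange_mixed", ("Orange-like", (L.countP pvPo : Int)))] : PySem.Dict String (String × Int)) = PySem.Dict.mk
          [("red_dominant", ("Red dominant", (L.countP pvPr : Int))),
           ("green_dominant", ("Green dominant", (L.countP pvPg : Int))),
           ("blue_dominant", ("Blue dominant", (L.countP pvPb : Int))),
           ("purple_mixed", ("Purple-like", (L.countP pvPp : Int))),
           ("orange_mixed", ("Orange-like", (L.countP pvPo : Int)))] from rfl]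
        simp [n1, n2, n3, n4, n5, PySem.Dict.get?]
      simp only [f1, f2, f3, f4, f5, Bool.false_eq_true, if_false, hget]

-- ===== VERDICT (by name: the statement is the Claim_ definition above) =====
theorem analyze_color_family_consistency_py_spec : Claim_equal_analyze_color_family_consistency_py := by
  intro family colors _
  unfold Spec_analyze_color_family_consistency_py
  exact analyze_eq family colors
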